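-- pv_equiv track=rewrite | github.com/roberttovornik/multi-robot-parallel-plan-execution | algorithm_ppac.py | get_real_time_wait_times_depretacted
-- ===== SOURCE A (Python) =====
-- def is_rotation_required(orientations, index):
--     if(orientations[index] == orientations[index+1]):
--         return False
--     else:
--         return True
--
-- def get_real_time_wait_times_depretacted(paths_with_orientations):
--     """
--         Function accepts all robot paths along with their pose orientations, and returns optimized path plan, corrected
--         with the cost of required path rotations.
--     """
--     additional_hold_commands_required = [[] for r in paths_with_orientations ]
--
--     for r_i, r_path_orientation in enumerate(paths_with_orientations):
--         my_path = r_path_orientation[0]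
--         my_orientations = r_path_orientation[1]
--
--         # go through each step and check successor step of other robots
--         for step_i, step in enumerate(my_path):
--             for r_j, r_j_path_orient in enumerate(paths_with_orientations):
--                 # do not compare with yourself
--                 if(
--                     r_i == r_j    #nothing to compare
--                     or
--                     len(r_j_path_orient[0]) <= step_i + 1  # the other robot has already reached it's goal
--                     or
--                     step_i == len(my_path)-1    # last rotation is in place -> we do not care about it
--                     or
--                     not is_rotation_required(my_orientations, step_i)   # no rotation is required
--                 ):
--                     continue    # go to next robot
--                 else:
--                     # only append if my current step is same as his next (he is dependant of me)
--                     ##### also append if he is waiting on me.. so while his position is equal to current, keep shifting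
--                     if step == r_j_path_orient[0][step_i+1]:
--                         additional_hold_commands_required[r_j].append(step_i+1)
--
--     # clean up hold commands (we do not wish to duplicate them more)
--     return additional_hold_commands_required
-- ===== SOURCE B (Python) =====
-- def get_real_time_wait_times_depretacted(paths_with_orientations):
--     # Index (position_index, cell) -> robots occupying that cell at that index;
--     # one lookup per step replaces A's rescans of all robots.
--     index = {}
--     for j, (path, _orient) in enumerate(paths_with_orientations):
--         for t in range(1, len(path)):
--             index.setdefault((t, path[t]), []).append(j)
--     rows = [[] for _ in paths_with_orientations]
--     for i, (path, orient) in enumerate(paths_with_orientations):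
--         for s in range(len(path) - 1):
--             for j in index.get((s + 1, path[s]), ()):
--                 if j != i and orient[s] != orient[s + 1]:
--                     rows[j].append(s + 1)
--     return rows
-- ===== Notes on version B (the rewrite author's own statement) =====
-- stated objective: faster
-- what changed: A's triple nested loop rescans every other robot for every step; B builds a (position_index, cell) -> robots index once and replaces the inner rescan by a single hash lookup per step, appending to the same per-robot rows.
import Mathlib
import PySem

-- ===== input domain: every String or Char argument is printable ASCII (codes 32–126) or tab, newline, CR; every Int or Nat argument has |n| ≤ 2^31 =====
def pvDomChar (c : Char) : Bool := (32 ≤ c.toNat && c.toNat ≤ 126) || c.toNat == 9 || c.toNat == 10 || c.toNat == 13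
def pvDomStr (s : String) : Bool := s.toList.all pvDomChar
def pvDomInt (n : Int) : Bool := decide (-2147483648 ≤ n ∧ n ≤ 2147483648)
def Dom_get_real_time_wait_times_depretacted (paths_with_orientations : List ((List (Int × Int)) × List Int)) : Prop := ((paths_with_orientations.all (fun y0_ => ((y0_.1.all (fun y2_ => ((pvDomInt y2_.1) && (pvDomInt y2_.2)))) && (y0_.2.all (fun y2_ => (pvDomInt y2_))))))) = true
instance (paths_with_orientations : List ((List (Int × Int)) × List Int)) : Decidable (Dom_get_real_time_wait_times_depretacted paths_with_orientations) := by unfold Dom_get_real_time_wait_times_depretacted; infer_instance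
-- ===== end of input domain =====

-- B replaces A's inner rescan of all robots by a (position_index, cell) -> robots index built
-- once, looked up per step; same per-robot rows, appended in the same order.

-- ===== PORT A =====
def is_rotation_required (orientations : List Int) (index : Int) : Bool :=
  if PySem.List.pyGetD orientations index 0 = PySem.List.pyGetD orientations (index + 1) 0 then
    false
  else
    true

def get_real_time_wait_times_depretacted (paths_with_orientations : List ((List (Int × Int)) × List Int)) : List (List Int) :=
  let init : List (List Int) := paths_with_orientations.map (fun _ => [])
  (PySem.List.enumerate paths_with_orientations 0).foldl (fun acc ir =>
    let my_path := ir.2.1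
    let my_orientations := ir.2.2
    (PySem.List.enumerate my_path 0).foldl (fun acc ss =>
      (PySem.List.enumerate paths_with_orientations 0).foldl (fun acc jr =>
        if ir.1 = jr.1 ∨ PySem.List.len jr.2.1 ≤ ss.1 + 1 ∨
           ss.1 = PySem.List.len my_path - 1 ∨
           ¬ (is_rotation_required my_orientations ss.1 = true) then
          acc
        else if ss.2 = PySem.List.pyGetD jr.2.1 (ss.1 + 1) (0, 0) then
          PySem.List.pySetD acc jr.1 (PySem.List.pyGetD acc jr.1 [] ++ [ss.1 + 1])
        else
          acc) acc) acc) init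

-- ===== PORT B =====
def get_real_time_wait_times_depretacted_alt (paths_with_orientations : List ((List (Int × Int)) × List Int)) : List (List Int) :=
  -- index.setdefault((t, path[t]), []).append(j)  ==  modify key [] (· ++ [j])
  let index : PySem.Dict (Int × (Int × Int)) (List Int) :=
    (PySem.List.enumerate paths_with_orientations 0).foldl (fun d jp =>
      (PySem.List.pyRange 1 (PySem.List.len jp.2.1) 1).foldl (fun d t =>
        d.modify (t, PySem.List.pyGetD jp.2.1 t (0, 0)) [] (· ++ [jp.1])) d) PySem.Dict.empty
  let rows : List (List Int) := paths_with_orientations.map (fun _ => [])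
  (PySem.List.enumerate paths_with_orientations 0).foldl (fun rows ip =>
    (PySem.List.pyRange 0 (PySem.List.len ip.2.1 - 1) 1).foldl (fun rows s =>
      (index.getD (s + 1, PySem.List.pyGetD ip.2.1 s (0, 0)) []).foldl (fun rows j =>
        if j ≠ ip.1 ∧ PySem.List.pyGetD ip.2.2 s 0 ≠ PySem.List.pyGetD ip.2.2 (s + 1) 0 then
          PySem.List.pySetD rows j (PySem.List.pyGetD rows j [] ++ [s + 1])
        else
          rows) rows) rows) rows

-- ===== PRECONDITION & SPEC =====
-- Pre_ excludes exactly the inputs on which A raises IndexError: a robot whose orientation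
-- list is too short at some non-final step while some other robot's path reaches past that step.
def Pre_get_real_time_wait_times_depretacted (paths_with_orientations : List ((List (Int × Int)) × List Int)) : Prop :=
  ∀ p ∈ PySem.List.enumerate paths_with_orientations 0,
    ∀ s ∈ PySem.List.pyRange 0 (PySem.List.len p.2.1 - 1) 1,
      (∃ q ∈ PySem.List.enumerate paths_with_orientations 0,
          q.1 ≠ p.1 ∧ s + 1 < PySem.List.len q.2.1) →
        s + 1 < PySem.List.len p.2.2
instance (paths_with_orientations : List ((List (Int × Int)) × List Int)) : Decidable (Pre_get_real_time_wait_times_depretacted paths_with_orientations) := by unfold Pre_get_real_time_wait_times_depretacted; infer_instance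

def pvWitness_get_real_time_wait_times_depretacted : (List ((List (Int × Int)) × List Int)) :=
  [([(0, 0), (1, 1)], [0, 1]), ([(5, 5), (0, 0), (2, 2)], [0, 0, 0])]

def Spec_get_real_time_wait_times_depretacted (paths_with_orientations : List ((List (Int × Int)) × List Int)) (out : List (List Int)) : Prop := out = get_real_time_wait_times_depretacted_alt paths_with_orientations
instance (paths_with_orientations : List ((List (Int × Int)) × List Int)) (out : List (List Int)) : Decidable (Spec_get_real_time_wait_times_depretacted paths_with_orientations out) := by unfold Spec_get_real_time_wait_times_depretacted; infer_instance

-- ===== CLAIM (what is proved, stated in full; the proofs are below) =====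
def Claim_equal_get_real_time_wait_times_depretacted : Prop := ∀ (paths_with_orientations : List ((List (Int × Int)) × List Int)), Dom_get_real_time_wait_times_depretacted paths_with_orientations → Pre_get_real_time_wait_times_depretacted paths_with_orientations → Spec_get_real_time_wait_times_depretacted paths_with_orientations (get_real_time_wait_times_depretacted paths_with_orientations)

-- ===== LEMMAS AND PROOFS =====

-- Both programs mutate rows of the same table; we factor every row update as an
-- "instruction" (target row, appended value) and show both emit the SAME instruction stream.
def applyInstr (instr : List (Int × Int)) (acc : List (List Int)) : List (List Int) :=
  instr.foldl (fun a p => PySem.List.pySetD a p.1 (PySem.List.pyGetD a p.1 [] ++ [p.2])) acc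

lemma applyInstr_append (l₁ l₂ : List (Int × Int)) (acc : List (List Int)) :
    applyInstr (l₁ ++ l₂) acc = applyInstr l₂ (applyInstr l₁ acc) := by
  simp [applyInstr, List.foldl_append]

lemma foldl_applyInstr {α : Type} (l : List α) (g : α → List (Int × Int)) (acc : List (List Int)) :
    l.foldl (fun a x => applyInstr (g x) a) acc = applyInstr (l.flatMap g) acc := by
  induction l generalizing acc with
  | nil => simp [applyInstr]
  | cons x xs ih => simp [List.flatMap_cons, applyInstr_append, ih]

-- the instruction stream of A
def gInner (ir : Int × (List (Int × Int)) × List Int) (ss : Int × (Int × Int))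
    (jr : Int × (List (Int × Int)) × List Int) : List (Int × Int) :=
  if (¬ (ir.1 = jr.1 ∨ PySem.List.len jr.2.1 ≤ ss.1 + 1 ∨
          ss.1 = PySem.List.len ir.2.1 - 1 ∨
          ¬ (is_rotation_required ir.2.2 ss.1 = true))) ∧
     ss.2 = PySem.List.pyGetD jr.2.1 (ss.1 + 1) (0, 0) then
    [(jr.1, ss.1 + 1)]
  else
    []

def instrA (pwo : List ((List (Int × Int)) × List Int)) : List (Int × Int) :=
  (PySem.List.enumerate pwo 0).flatMap (fun ir =>
    (PySem.List.enumerate ir.2.1 0).flatMap (fun ss =>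
      (PySem.List.enumerate pwo 0).flatMap (gInner ir ss)))

lemma A_eq_apply (pwo : List ((List (Int × Int)) × List Int)) :
    get_real_time_wait_times_depretacted pwo =
      applyInstr (instrA pwo) (pwo.map (fun _ => [])) := by
  unfold get_real_time_wait_times_depretacted instrA
  dsimp only
  rw [← foldl_applyInstr]
  refine PySem.List.foldl_congr_mem _ _ _ _ (fun acc ir _ => ?_)
  rw [← foldl_applyInstr]
  refine PySem.List.foldl_congr_mem _ _ _ _ (fun acc ss _ => ?_)
  rw [← foldl_applyInstr]
  refine PySem.List.foldl_congr_mem _ _ _ _ (fun acc jr _ => ?_)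
  unfold gInner
  by_cases h1 : ir.1 = jr.1 ∨ PySem.List.len jr.2.1 ≤ ss.1 + 1 ∨
      ss.1 = PySem.List.len ir.2.1 - 1 ∨ ¬ (is_rotation_required ir.2.2 ss.1 = true)
  · rw [if_pos h1, if_neg (fun hc => hc.1 h1)]
    rfl
  · by_cases h2 : ss.2 = PySem.List.pyGetD jr.2.1 (ss.1 + 1) (0, 0)
    · rw [if_neg h1, if_pos h2, if_pos ⟨h1, h2⟩]
      rfl
    · rw [if_neg h1, if_neg h2, if_neg (fun hc => h2 hc.2)]
      rfl

-- the robots whose path occupies cell c at position t, in robot order ("hits" of the index)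
def hits (pwo : List ((List (Int × Int)) × List Int)) (t : Int) (c : Int × Int) : List Int :=
  (PySem.List.enumerate pwo 0).flatMap (fun jp =>
    if t ∈ PySem.List.pyRange 1 (PySem.List.len jp.2.1) 1 ∧
       PySem.List.pyGetD jp.2.1 t (0, 0) = c then [jp.1] else [])

-- the key-value pair stream that builds B's index
def keyPairs (pwo : List ((List (Int × Int)) × List Int)) : List ((Int × (Int × Int)) × Int) :=
  (PySem.List.enumerate pwo 0).flatMap (fun jp =>
    (PySem.List.pyRange 1 (PySem.List.len jp.2.1) 1).map
      (fun t => ((t, PySem.List.pyGetD jp.2.1 t (0, 0)), jp.1)))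

lemma key_filter (l : List Int) (hnd : l.Nodup)
    (g : Int → Int × Int) (t : Int) (c : Int × Int) (j : Int) :
    (((l.map (fun t' => ((t', g t'), j))).filter (fun p => p.1 == (t, c))).map (·.2))
      = if t ∈ l ∧ g t = c then [j] else [] := by
  induction l with
  | nil => simp
  | cons x xs ih =>
    rw [List.nodup_cons] at hnd
    by_cases hx : x = t
    · subst hx
      have htail : ((xs.map (fun t' => ((t', g t'), j))).filter (fun p => p.1 == (x, c))) = [] := by
        rw [List.filter_eq_nil_iff]
        intro p hp
        rw [List.mem_map] at hp
        obtain ⟨t', ht', rfl⟩ := hp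
        simp only [beq_iff_eq, Prod.mk.injEq, not_and]
        intro hcc
        exact absurd (hcc ▸ ht') hnd.1
      by_cases hc : g x = c
      · simp [hc, htail]
      · simp [hc, htail]
    · have hhead : (((x, g x), j).1 == (t, c)) = false := by
        simp [hx]
      simp only [List.map_cons, List.filter_cons, hhead, Bool.false_eq_true, if_false]
      rw [ih hnd.2]
      by_cases hm : t ∈ xs ∧ g t = c
      · rw [if_pos hm, if_pos ⟨List.mem_cons_of_mem _ hm.1, hm.2⟩]
      · rw [if_neg hm, if_neg (fun hh => hm ⟨(List.mem_cons.1 hh.1).resolve_left (fun e => hx e.symm), hh.2⟩)]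

lemma lookup_eq (pwo : List ((List (Int × Int)) × List Int)) (t : Int) (c : Int × Int) :
    ((keyPairs pwo).foldl (fun d p => d.modify p.1 [] (· ++ [p.2]))
        (PySem.Dict.empty : PySem.Dict (Int × (Int × Int)) (List Int))).getD (t, c) []
      = hits pwo t c := by
  rw [PySem.Dict.getD_foldl_modify_append, PySem.Dict.getD_empty, List.nil_append]
  unfold keyPairs hits
  rw [List.filter_flatMap, List.map_flatMap]
  refine List.flatMap_congr (fun jp _ => ?_)
  exact key_filter _ (PySem.List.nodup_pyRange_one _ _) _ t c jp.1

-- the instruction stream of B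
def instrB (pwo : List ((List (Int × Int)) × List Int)) : List (Int × Int) :=
  (PySem.List.enumerate pwo 0).flatMap (fun ip =>
    (PySem.List.pyRange 0 (PySem.List.len ip.2.1 - 1) 1).flatMap (fun s =>
      (hits pwo (s + 1) (PySem.List.pyGetD ip.2.1 s (0, 0))).flatMap (fun j =>
        if j ≠ ip.1 ∧ PySem.List.pyGetD ip.2.2 s 0 ≠ PySem.List.pyGetD ip.2.2 (s + 1) 0 then
          [(j, s + 1)]
        else
          [])))

lemma index_eq (pwo : List ((List (Int × Int)) × List Int)) :
    (PySem.List.enumerate pwo 0).foldl (fun d jp =>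
        (PySem.List.pyRange 1 (PySem.List.len jp.2.1) 1).foldl (fun d t =>
          d.modify (t, PySem.List.pyGetD jp.2.1 t (0, 0)) [] (· ++ [jp.1])) d)
        (PySem.Dict.empty : PySem.Dict (Int × (Int × Int)) (List Int))
      = (keyPairs pwo).foldl (fun d p => d.modify p.1 [] (· ++ [p.2])) PySem.Dict.empty := by
  unfold keyPairs
  rw [List.foldl_flatMap]
  refine PySem.List.foldl_congr_mem _ _ _ _ (fun d jp _ => ?_)
  rw [List.foldl_map]

lemma B_eq_apply (pwo : List ((List (Int × Int)) × List Int)) :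
    get_real_time_wait_times_depretacted_alt pwo =
      applyInstr (instrB pwo) (pwo.map (fun _ => [])) := by
  unfold get_real_time_wait_times_depretacted_alt instrB
  dsimp only
  rw [index_eq]
  rw [← foldl_applyInstr]
  refine PySem.List.foldl_congr_mem _ _ _ _ (fun rows ip _ => ?_)
  rw [← foldl_applyInstr]
  refine PySem.List.foldl_congr_mem _ _ _ _ (fun rows s _ => ?_)
  rw [lookup_eq, ← foldl_applyInstr]
  refine PySem.List.foldl_congr_mem _ _ _ _ (fun rows j _ => ?_)
  by_cases h : j ≠ ip.1 ∧ PySem.List.pyGetD ip.2.2 s 0 ≠ PySem.List.pyGetD ip.2.2 (s + 1) 0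
  · rw [if_pos h, if_pos h]
    rfl
  · rw [if_neg h, if_neg h]
    rfl

lemma rot_iff (o : List Int) (s : Int) :
    is_rotation_required o s = true ↔
      PySem.List.pyGetD o s 0 ≠ PySem.List.pyGetD o (s + 1) 0 := by
  unfold is_rotation_required
  split_ifs with h <;> simp [h]

lemma instr_eq (pwo : List ((List (Int × Int)) × List Int)) :
    instrA pwo = instrB pwo := by
  unfold instrA instrB
  refine List.flatMap_congr (fun ip _ => ?_)
  rw [PySem.List.enumerate_eq_map_pyRange ip.2.1 ((0, 0) : Int × Int), List.flatMap_map]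
  have hcell : ∀ s, s ∈ PySem.List.pyRange 0 (PySem.List.len ip.2.1 - 1) 1 →
      (PySem.List.enumerate pwo 0).flatMap
          (gInner ip (s, PySem.List.pyGetD ip.2.1 s (0, 0)))
        = (hits pwo (s + 1) (PySem.List.pyGetD ip.2.1 s (0, 0))).flatMap (fun j =>
            if j ≠ ip.1 ∧ PySem.List.pyGetD ip.2.2 s 0 ≠ PySem.List.pyGetD ip.2.2 (s + 1) 0 then
              [(j, s + 1)]
            else
              []) := by
    intro s hs
    obtain ⟨hs0, hs1⟩ := PySem.List.mem_pyRange_one.1 hs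
    unfold hits
    rw [List.flatMap_assoc]
    refine List.flatMap_congr (fun jp _ => ?_)
    have hsplit : ((if s + 1 ∈ PySem.List.pyRange 1 (PySem.List.len jp.2.1) 1 ∧
          PySem.List.pyGetD jp.2.1 (s + 1) (0, 0) = PySem.List.pyGetD ip.2.1 s (0, 0) then
            [jp.1] else []).flatMap (fun j =>
          if j ≠ ip.1 ∧ PySem.List.pyGetD ip.2.2 s 0 ≠ PySem.List.pyGetD ip.2.2 (s + 1) 0 then
            [(j, s + 1)] else []))
        = if (s + 1 ∈ PySem.List.pyRange 1 (PySem.List.len jp.2.1) 1 ∧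
              PySem.List.pyGetD jp.2.1 (s + 1) (0, 0) = PySem.List.pyGetD ip.2.1 s (0, 0)) ∧
             (jp.1 ≠ ip.1 ∧ PySem.List.pyGetD ip.2.2 s 0 ≠ PySem.List.pyGetD ip.2.2 (s + 1) 0) then
            [(jp.1, s + 1)] else [] := by
      by_cases h1 : s + 1 ∈ PySem.List.pyRange 1 (PySem.List.len jp.2.1) 1 ∧
          PySem.List.pyGetD jp.2.1 (s + 1) (0, 0) = PySem.List.pyGetD ip.2.1 s (0, 0)
      · rw [if_pos h1, List.flatMap_singleton]
        by_cases h2 : jp.1 ≠ ip.1 ∧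
            PySem.List.pyGetD ip.2.2 s 0 ≠ PySem.List.pyGetD ip.2.2 (s + 1) 0
        · rw [if_pos h2, if_pos ⟨h1, h2⟩]
        · rw [if_neg h2, if_neg (fun hc => h2 hc.2)]
      · rw [if_neg h1, if_neg (fun hc => h1 hc.1), List.flatMap_nil]
    rw [hsplit]
    unfold gInner
    have hmem : s + 1 ∈ PySem.List.pyRange 1 (PySem.List.len jp.2.1) 1 ↔
        s + 1 < PySem.List.len jp.2.1 := by
      rw [PySem.List.mem_pyRange_one]
      omega
    by_cases hA : (¬ (ip.1 = jp.1 ∨ PySem.List.len jp.2.1 ≤ s + 1 ∨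
          s = PySem.List.len ip.2.1 - 1 ∨ ¬ (is_rotation_required ip.2.2 s = true))) ∧
        PySem.List.pyGetD ip.2.1 s (0, 0) = PySem.List.pyGetD jp.2.1 (s + 1) (0, 0)
    · rw [if_pos hA]
      push Not at hA
      rw [if_pos ⟨⟨hmem.2 hA.1.2.1, hA.2.symm⟩,
        ⟨fun e => hA.1.1 e.symm, (rot_iff ip.2.2 s).1 hA.1.2.2.2⟩⟩]
    · rw [if_neg hA]
      rw [if_neg ?_]
      rintro ⟨⟨hm, hc⟩, hne, hrot⟩
      refine hA ⟨?_, hc.symm⟩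
      push Not
      exact ⟨fun e => hne e.symm, hmem.1 hm, by omega, (rot_iff ip.2.2 s).2 hrot⟩
  by_cases hlen : PySem.List.len ip.2.1 ≤ 0
  · rw [PySem.List.pyRange_one_eq_nil hlen, PySem.List.pyRange_one_eq_nil (by omega)]
    simp
  · rw [PySem.List.pyRange_one_append 0 (PySem.List.len ip.2.1 - 1) (PySem.List.len ip.2.1)
      (by rw [PySem.List.len_eq] at hlen ⊢; omega) (by omega), List.flatMap_append]
    have hlast : ∀ s ∈ PySem.List.pyRange (PySem.List.len ip.2.1 - 1) (PySem.List.len ip.2.1) 1,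
        (PySem.List.enumerate pwo 0).flatMap
            (gInner ip (s, PySem.List.pyGetD ip.2.1 s (0, 0))) = [] := by
      intro s hs
      obtain ⟨h1, h2⟩ := PySem.List.mem_pyRange_one.1 hs
      have hseq : s = PySem.List.len ip.2.1 - 1 := by omega
      rw [List.flatMap_eq_nil_iff]
      intro jp _
      unfold gInner
      rw [if_neg (fun hc => hc.1 (Or.inr (Or.inr (Or.inl hseq))))]
    rw [List.flatMap_eq_nil_iff.2 hlast, List.append_nil]
    exact List.flatMap_congr hcell

theorem pv_main : ∀ (pwo : List ((List (Int × Int)) × List Int)),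
    get_real_time_wait_times_depretacted pwo = get_real_time_wait_times_depretacted_alt pwo := by
  intro pwo
  rw [A_eq_apply, B_eq_apply, instr_eq]

-- ===== VERDICT (by name: the statement is the Claim_ definition above) =====
theorem get_real_time_wait_times_depretacted_spec : Claim_equal_get_real_time_wait_times_depretacted := by
  intro pwo _ _
  exact pv_main pwo
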